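-- pv_equiv track=rewrite | github.com/HalKiyo/h08_urban | wsi/pre/updown/main.py | is_valid_edge
-- ===== SOURCE A (Python) =====
-- def is_valid_edge(city1, city2, coords_dict):
--     for coord, city_list in coords_dict.items():
--         if len(city_list) > 1:
--             if city1 in city_list and city2 in city_list:
--                 if city1 > city2:
--                     continue
--                 else:
--                     city1, city2 = None, None
--
--     if city1 and city2:
--         return True
--     else:
--         return False
-- ===== SOURCE B (Python) =====
-- def is_valid_edge(city1, city2, coords_dict):
--     # inverted index: city -> set of indices of big (len>1) groups containing it
--     occ = {}
--     for i, city_list in enumerate(coords_dict.values()):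
--         if len(city_list) > 1:
--             for c in city_list:
--                 occ.setdefault(c, set()).add(i)
--     conflict = occ.get(city1, set()) & occ.get(city2, set())
--     return bool(city1 and city2) and (city1 > city2 or not conflict)
-- ===== Notes on version B (the rewrite author's own statement) =====
-- stated objective: alternative
-- what changed: Replaces A's direct scan (membership-testing city1/city2 in every group and nulling them via a sentinel) with an inverted index built in one pass (city -> set of indices of len>1 groups) followed by a set intersection of the two cities' index sets; the final answer is a boolean expression over that intersection.
import Mathlib
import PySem

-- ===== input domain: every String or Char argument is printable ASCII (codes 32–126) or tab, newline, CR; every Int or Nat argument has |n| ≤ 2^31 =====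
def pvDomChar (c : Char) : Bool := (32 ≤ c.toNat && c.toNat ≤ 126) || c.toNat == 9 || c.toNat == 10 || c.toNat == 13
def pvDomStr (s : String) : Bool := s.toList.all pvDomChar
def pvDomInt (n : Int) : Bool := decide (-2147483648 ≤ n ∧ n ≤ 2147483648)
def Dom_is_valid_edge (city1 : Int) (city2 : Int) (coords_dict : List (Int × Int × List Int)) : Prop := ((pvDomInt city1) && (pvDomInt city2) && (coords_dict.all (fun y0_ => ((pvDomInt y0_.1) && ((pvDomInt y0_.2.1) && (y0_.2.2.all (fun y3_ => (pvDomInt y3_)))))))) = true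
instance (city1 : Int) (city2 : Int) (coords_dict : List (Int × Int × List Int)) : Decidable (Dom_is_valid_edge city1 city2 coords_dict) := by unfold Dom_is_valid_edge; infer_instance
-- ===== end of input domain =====

-- B replaces A's sentinel-mutating scan by an inverted index (city -> set of big-group indices)
-- plus a set intersection; same value everywhere.

-- ===== PORT A =====
-- A reassigns city1, city2 to None inside the loop; we model that as a fold over a pair of Options.
def pvStepA (city1 : Int) (city2 : Int)
    (st : Option Int × Option Int) (kv : Int × Int × List Int) : Option Int × Option Int :=
  let city_list := kv.2.2
  if city_list.length > 1 then
    if (match st.1 with | some x => city_list.contains x | none => false) &&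
       (match st.2 with | some y => city_list.contains y | none => false) then
      -- both are `some` when this branch fires (membership of None is False in Python)
      if st.1.getD city1 > st.2.getD city2 then st else (none, none)
    else st
  else st

def is_valid_edge (city1 : Int) (city2 : Int) (coords_dict : List (Int × Int × List Int)) : Bool :=
  let st := coords_dict.foldl (pvStepA city1 city2) (some city1, some city2)
  -- `if city1 and city2: return True else: return False` — None and 0 are falsy
  match st with
  | (some a, some b) => a != 0 && b != 0
  | _ => false

-- ===== PORT B =====
-- occ.setdefault(c, set()).add(i)  =  occ[c] = occ.get(c, set()).add(i)  =  Dict.modify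
def pvAddGroup (i : Int) (cl : List Int) (occ : PySem.Dict Int (PySem.Set Int)) :
    PySem.Dict Int (PySem.Set Int) :=
  cl.foldl (fun o c => o.modify c PySem.Set.empty (fun s => PySem.Set.add s i)) occ

def is_valid_edge_alt (city1 : Int) (city2 : Int) (coords_dict : List (Int × Int × List Int)) : Bool :=
  let occ := (PySem.List.enumerate (coords_dict.map (·.2.2)) 0).foldl
    (fun o p => if p.2.length > 1 then pvAddGroup p.1 p.2 o else o)
    PySem.Dict.empty
  let conflict := PySem.Set.inter (occ.getD city1 PySem.Set.empty) (occ.getD city2 PySem.Set.empty)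
  (city1 != 0 && city2 != 0) && (decide (city1 > city2) || conflict.isEmpty)

-- ===== PRECONDITION & SPEC =====
def Spec_is_valid_edge (city1 : Int) (city2 : Int) (coords_dict : List (Int × Int × List Int)) (out : Bool) : Prop := out = is_valid_edge_alt city1 city2 coords_dict
instance (city1 : Int) (city2 : Int) (coords_dict : List (Int × Int × List Int)) (out : Bool) : Decidable (Spec_is_valid_edge city1 city2 coords_dict out) := by unfold Spec_is_valid_edge; infer_instance

-- ===== CLAIM (what is proved, stated in full; the proofs are below) =====
def Claim_equal_is_valid_edge : Prop := ∀ (city1 : Int) (city2 : Int) (coords_dict : List (Int × Int × List Int)), Dom_is_valid_edge city1 city2 coords_dict → Spec_is_valid_edge city1 city2 coords_dict (is_valid_edge city1 city2 coords_dict)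

-- ===== LEMMAS AND PROOFS =====

-- (none, none) is a fixed point of A's loop body.
theorem foldl_none (city1 city2 : Int) (l : List (Int × Int × List Int)) :
    l.foldl (pvStepA city1 city2) (none, none) = (none, none) := by
  induction l with
  | nil => rfl
  | cons kv tl ih =>
      simp only [List.foldl_cons]
      have h : pvStepA city1 city2 (none, none) kv = (none, none) := by
        simp [pvStepA]
      rw [h, ih]

-- When city1 > city2, A's loop never changes the state.
theorem foldl_gt (city1 city2 : Int) (h : city1 > city2) (l : List (Int × Int × List Int)) :
    l.foldl (pvStepA city1 city2) (some city1, some city2) = (some city1, some city2) := by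
  induction l with
  | nil => rfl
  | cons kv tl ih =>
      simp only [List.foldl_cons]
      have hs : pvStepA city1 city2 (some city1, some city2) kv = (some city1, some city2) := by
        simp only [pvStepA, Option.getD_some]
        split_ifs <;> rfl
      rw [hs, ih]

-- When ¬ city1 > city2, A's fold keeps the pair iff no coord list matches, else collapses to (none, none).
theorem foldl_le (city1 city2 : Int) (h : ¬ city1 > city2) (l : List (Int × Int × List Int)) :
    l.foldl (pvStepA city1 city2) (some city1, some city2) =
      (if l.all (fun kv => !(decide (kv.2.2.length > 1) && kv.2.2.contains city1 && kv.2.2.contains city2))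
       then (some city1, some city2) else (none, none)) := by
  induction l with
  | nil => rfl
  | cons kv tl ih =>
      simp only [List.foldl_cons, List.all_cons]
      by_cases hm : (decide (kv.2.2.length > 1) && kv.2.2.contains city1 && kv.2.2.contains city2) = true
      · have hstep : pvStepA city1 city2 (some city1, some city2) kv = (none, none) := by
          simp only [List.contains_eq_mem, Bool.and_eq_true, decide_eq_true_eq] at hm
          simp [pvStepA, hm.1.1, hm.1.2, hm.2, h]
        rw [hstep, foldl_none]
        simp only [hm, Bool.not_true, Bool.false_and, Bool.false_eq_true, if_false]
      · have hstep : pvStepA city1 city2 (some city1, some city2) kv = (some city1, some city2) := by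
          simp only [pvStepA]
          by_cases hl : kv.2.2.length > 1
          · by_cases hc1 : city1 ∈ kv.2.2
            · by_cases hc2 : city2 ∈ kv.2.2
              · exact absurd (by simp [hl, hc1, hc2]) hm
              · simp [hl, hc1, hc2]
            · simp [hl, hc1]
          · simp [hl]
        rw [hstep, ih]
        rw [Bool.not_eq_true] at hm
        simp only [hm, Bool.not_false, Bool.true_and]

-- Membership in the inner fold (one group's update of the index).
theorem mem_pvAddGroup (i : Int) (cl : List Int) (occ : PySem.Dict Int (PySem.Set Int))
    (c x : Int) :
    (x ∈ (pvAddGroup i cl occ).getD c PySem.Set.empty) ↔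
      x ∈ occ.getD c PySem.Set.empty ∨ (c ∈ cl ∧ x = i) := by
  induction cl generalizing occ with
  | nil => simp [pvAddGroup]
  | cons a tl ih =>
      simp only [pvAddGroup, List.foldl_cons] at *
      rw [ih]
      by_cases hca : c = a
      · subst hca
        rw [PySem.Dict.getD_modify_self, PySem.Set.mem_add]
        simp only [List.mem_cons]
        tauto
      · rw [PySem.Dict.getD_modify, if_neg hca]
        simp only [List.mem_cons]
        tauto

-- Membership in the whole inverted index.
theorem mem_occ (l : List (Int × List Int)) (occ : PySem.Dict Int (PySem.Set Int)) (c x : Int) :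
    (x ∈ (l.foldl (fun o p => if p.2.length > 1 then pvAddGroup p.1 p.2 o else o) occ).getD c PySem.Set.empty) ↔
      x ∈ occ.getD c PySem.Set.empty ∨ ∃ p ∈ l, p.2.length > 1 ∧ c ∈ p.2 ∧ x = p.1 := by
  induction l generalizing occ with
  | nil => simp
  | cons p tl ih =>
      simp only [List.foldl_cons]
      by_cases hl : p.2.length > 1
      · rw [if_pos hl, ih, mem_pvAddGroup]
        simp only [List.mem_cons]
        constructor
        · rintro (⟨h | ⟨hc, hx⟩⟩ | ⟨q, hq, h⟩)
          · exact Or.inl h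
          · exact Or.inr ⟨p, Or.inl rfl, hl, hc, hx⟩
          · exact Or.inr ⟨q, Or.inr hq, h⟩
        · rintro (h | ⟨q, hq | hq, h1, h2, h3⟩)
          · exact Or.inl (Or.inl h)
          · subst hq; exact Or.inl (Or.inr ⟨h2, h3⟩)
          · exact Or.inr ⟨q, hq, h1, h2, h3⟩
      · rw [if_neg hl, ih]
        simp only [List.mem_cons]
        constructor
        · rintro (h | ⟨q, hq, h⟩)
          · exact Or.inl h
          · exact Or.inr ⟨q, Or.inr hq, h⟩
        · rintro (h | ⟨q, hq | hq, h1, h2, h3⟩)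
          · exact Or.inl h
          · subst hq; exact absurd h1 hl
          · exact Or.inr ⟨q, hq, h1, h2, h3⟩

-- The intersection of the two index sets is empty iff no big group contains both cities.
theorem conflict_empty_iff (city1 city2 : Int) (coords_dict : List (Int × Int × List Int)) :
    (PySem.Set.inter
        (((PySem.List.enumerate (coords_dict.map (·.2.2)) 0).foldl
            (fun o p => if p.2.length > 1 then pvAddGroup p.1 p.2 o else o)
            PySem.Dict.empty).getD city1 PySem.Set.empty)
        (((PySem.List.enumerate (coords_dict.map (·.2.2)) 0).foldl
            (fun o p => if p.2.length > 1 then pvAddGroup p.1 p.2 o else o)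
            PySem.Dict.empty).getD city2 PySem.Set.empty)).isEmpty =
    coords_dict.all (fun kv => !(decide (kv.2.2.length > 1) && kv.2.2.contains city1 && kv.2.2.contains city2)) := by
  rw [Bool.eq_iff_iff, List.isEmpty_iff, List.eq_nil_iff_forall_not_mem, List.all_eq_true]
  constructor
  · intro hempty kv hkv
    simp only [List.contains_eq_mem, Bool.not_eq_true', Bool.and_eq_false_iff,
      decide_eq_false_iff_not]
    by_contra hcon
    push Not at hcon
    obtain ⟨⟨hl, hc1⟩, hc2⟩ := hcon
    -- the group kv.2.2 appears in the enumerate list at some index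
    obtain ⟨k, hk, hget⟩ := List.mem_iff_getElem.mp hkv
    have hmem : (((k : Int)), kv.2.2) ∈ PySem.List.enumerate (coords_dict.map (·.2.2)) 0 := by
      rw [PySem.List.mem_enumerate_iff]
      exact ⟨k, by simpa using hk, by simp [hget]⟩
    refine hempty (k : Int) ?_
    rw [PySem.Set.mem_inter]
    constructor
    · rw [mem_occ]; exact Or.inr ⟨_, hmem, hl, hc1, rfl⟩
    · rw [mem_occ]; exact Or.inr ⟨_, hmem, hl, hc2, rfl⟩
  · intro hall x hx
    rw [PySem.Set.mem_inter, mem_occ, mem_occ] at hx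
    obtain ⟨h1, h2⟩ := hx
    rcases h1 with h1 | ⟨p, hp, hpl, hpc, hpx⟩
    · simp [PySem.Dict.getD_empty, PySem.Set.empty] at h1
    rcases h2 with h2 | ⟨q, hq, hql, hqc, hqx⟩
    · simp [PySem.Dict.getD_empty, PySem.Set.empty] at h2
    -- same index ⇒ same group
    rw [PySem.List.mem_enumerate_iff] at hp hq
    obtain ⟨k, hk, hpe⟩ := hp
    obtain ⟨k', hk', hqe⟩ := hq
    have hkk : k = k' := by
      have : p.1 = q.1 := by rw [← hpx, hqx]
      rw [hpe, hqe] at this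
      simpa using this
    subst hkk
    have hpq : p.2 = q.2 := by rw [hpe, hqe]
    -- the group is a kv of coords_dict
    have hkv : ((coords_dict.map (·.2.2))[k]'(by simpa using hk)) ∈ coords_dict.map (·.2.2) :=
      List.getElem_mem _
    obtain ⟨kv, hkvmem, hkveq⟩ := List.mem_map.mp hkv
    have := hall kv hkvmem
    have hgrp : p.2 = kv.2.2 := by rw [hpe]; simp [hkveq]
    rw [hgrp] at hpl hpc
    rw [← hpq, hgrp] at hqc
    simp only [List.contains_eq_mem, Bool.not_eq_true', Bool.and_eq_false_iff,
      decide_eq_false_iff_not] at this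
    rcases this with (h | h) | h
    · exact h hpl
    · exact h hpc
    · exact h hqc

-- ===== VERDICT (by name: the statement is the Claim_ definition above) =====
theorem is_valid_edge_spec : Claim_equal_is_valid_edge := by
  intro city1 city2 coords_dict _
  unfold Spec_is_valid_edge is_valid_edge is_valid_edge_alt
  show (match coords_dict.foldl (pvStepA city1 city2) (some city1, some city2) with
    | (some a, some b) => a != 0 && b != 0
    | _ => false) =
    ((city1 != 0 && city2 != 0) &&
      (decide (city1 > city2) ||
        (PySem.Set.inter
          (((PySem.List.enumerate (coords_dict.map (·.2.2)) 0).foldl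
              (fun o p => if p.2.length > 1 then pvAddGroup p.1 p.2 o else o)
              PySem.Dict.empty).getD city1 PySem.Set.empty)
          (((PySem.List.enumerate (coords_dict.map (·.2.2)) 0).foldl
              (fun o p => if p.2.length > 1 then pvAddGroup p.1 p.2 o else o)
              PySem.Dict.empty).getD city2 PySem.Set.empty)).isEmpty))
  rw [conflict_empty_iff]
  by_cases hgt : city1 > city2
  · rw [foldl_gt city1 city2 hgt]
    by_cases h1 : city1 = 0 <;> by_cases h2 : city2 = 0 <;> simp [h1, h2, hgt]
  · rw [foldl_le city1 city2 hgt]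
    by_cases hall : coords_dict.all (fun kv => !(decide (kv.2.2.length > 1) && kv.2.2.contains city1 && kv.2.2.contains city2)) = true
    · rw [if_pos hall, hall]
      simp [hgt]
    · rw [if_neg hall]
      rw [Bool.not_eq_true] at hall
      rw [hall]
      simp [hgt]
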